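-- pv_equiv track=rewrite | github.com/PurpleL0tus/JohnKimComps2025 | keywords.py | pair_matcher_util
-- ===== SOURCE A (Python) =====
-- def pair_matcher_util(input, input2):
--     for i in range(len(max(input,input2))):
--         try:
--             if input[i] != input2[i]:
--
--                 return f'{input[:i]}({input[i:]}|{input2[i:]})'
--
--         except IndexError:
--             a = f'{input[i:]}{input2[i:]}'
--             if len(a) == 1:
--                 return f'{input[:i]}{a}?'
--             return f'{input[:i]}({a})?'
--
--     return None
-- ===== SOURCE B (Python) =====
-- def pair_matcher_util(input, input2):
--     # Binary search for the length of the longest common prefix: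
--     # prefix-equality input[:m] == input2[:m] is monotone in m on [0, min_len].
--     lo, hi = 0, min(len(input), len(input2))
--     while lo < hi:
--         mid = (lo + hi + 1) // 2
--         if input[:mid] == input2[:mid]:
--             lo = mid
--         else:
--             hi = mid - 1
--     i = lo
--     if i < len(input) and i < len(input2):
--         return f'{input[:i]}({input[i:]}|{input2[i:]})'
--     if len(input) == len(input2):
--         return None
--     rest = input[i:] + input2[i:]
--     if len(rest) == 1:
--         return f'{input[:i]}{rest}?'
--     return f'{input[:i]}({rest})?'
-- ===== Notes on version B (the rewrite author's own statement) =====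
-- stated objective: faster
-- what changed: Replaces A's exception-driven per-character indexed scan with a binary search over prefix lengths (prefix equality input[:m]==input2[:m] is monotone), then a single branch over the three result forms.
import Mathlib
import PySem

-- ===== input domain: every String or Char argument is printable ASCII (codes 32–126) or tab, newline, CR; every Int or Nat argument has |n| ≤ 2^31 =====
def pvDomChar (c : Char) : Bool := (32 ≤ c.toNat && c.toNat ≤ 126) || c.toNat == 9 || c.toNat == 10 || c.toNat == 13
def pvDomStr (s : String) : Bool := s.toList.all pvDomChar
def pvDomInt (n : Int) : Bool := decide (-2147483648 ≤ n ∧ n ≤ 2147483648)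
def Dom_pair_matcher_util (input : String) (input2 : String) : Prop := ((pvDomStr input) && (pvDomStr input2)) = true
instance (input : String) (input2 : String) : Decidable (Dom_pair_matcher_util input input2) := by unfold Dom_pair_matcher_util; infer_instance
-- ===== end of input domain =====

-- B replaces A's exception-driven indexed character scan by a binary search over prefix
-- lengths followed by one branch over the three result forms (alternative algorithm).

-- ===== PORT A =====
-- A's `for i in range(len(max(input,input2)))` loop with try/except, as the obvious fuel
-- recursion over the remaining iterations with the absolute index i carried along.
-- Python slices s[:i] / s[i:] with the nonnegative loop index i are List.take / List.drop
-- (exact for 0 ≤ i); s[i] under try/except IndexError is the Option-valued xs[i]?.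
def pmA_loop (xs ys : List Char) : Nat → Nat → Option String
  | 0, _ => none                                        -- range exhausted: return None
  | fuel+1, i =>
    match xs[i]?, ys[i]? with
    | some a, some b =>
      if a ≠ b then
        -- f'{input[:i]}({input[i:]}|{input2[i:]})'
        some (String.ofList (xs.take i ++ '(' :: xs.drop i ++ '|' :: ys.drop i ++ [')']))
      else pmA_loop xs ys fuel (i+1)
    | _, _ =>                                           -- except IndexError
      let a := xs.drop i ++ ys.drop i                   -- a = f'{input[i:]}{input2[i:]}'
      if a.length = 1 then some (String.ofList (xs.take i ++ a ++ ['?']))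
      else some (String.ofList (xs.take i ++ '(' :: a ++ ')' :: ['?']))

def pair_matcher_util (input : String) (input2 : String) : Option String :=
  let xs := input.toList
  let ys := input2.toList
  -- Python max(x,y) (lexicographic on code points) returns y iff x < y
  let mx := if xs < ys then ys else xs
  pmA_loop xs ys mx.length 0

-- ===== PORT B =====
-- B's `while lo < hi` binary search on prefix lengths; s[:mid] == s2[:mid] is
-- List.take mid equality, (lo+hi+1)//2 on nonnegative ints is Nat division.
def pmBS (xs ys : List Char) (lo hi : Nat) : Nat :=
  if _h : lo < hi then
    if xs.take ((lo + hi + 1) / 2) = ys.take ((lo + hi + 1) / 2) then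
      pmBS xs ys ((lo + hi + 1) / 2) hi
    else
      pmBS xs ys lo ((lo + hi + 1) / 2 - 1)
  else lo
termination_by hi - lo
decreasing_by all_goals omega

def pair_matcher_util_alt (input : String) (input2 : String) : Option String :=
  let xs := input.toList
  let ys := input2.toList
  let i := pmBS xs ys 0 (min xs.length ys.length)
  if i < xs.length ∧ i < ys.length then
    some (String.ofList (xs.take i ++ '(' :: xs.drop i ++ '|' :: ys.drop i ++ [')']))
  else if xs.length = ys.length then none
  else
    let rest := xs.drop i ++ ys.drop i
    if rest.length = 1 then some (String.ofList (xs.take i ++ rest ++ ['?']))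
    else some (String.ofList (xs.take i ++ '(' :: rest ++ ')' :: ['?']))

-- ===== PRECONDITION & SPEC =====
def Spec_pair_matcher_util (input : String) (input2 : String) (out : Option String) : Prop := out = pair_matcher_util_alt input input2
instance (input : String) (input2 : String) (out : Option String) : Decidable (Spec_pair_matcher_util input input2 out) := by unfold Spec_pair_matcher_util; infer_instance

-- ===== CLAIM (what is proved, stated in full; the proofs are below) =====
def Claim_equal_pair_matcher_util : Prop := ∀ (input : String) (input2 : String), Dom_pair_matcher_util input input2 → Spec_pair_matcher_util input input2 (pair_matcher_util input input2)

-- ===== LEMMAS AND PROOFS =====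

-- linear common-prefix length (proof-side characterisation of the binary search)
def pmB_pref : List Char → List Char → Nat
  | x::xs, y::ys => if x = y then pmB_pref xs ys + 1 else 0
  | _, _ => 0

lemma pmB_pref_cons (c : Char) (xs ys : List Char) :
    pmB_pref (c::xs) (c::ys) = pmB_pref xs ys + 1 := by
  simp [pmB_pref]

lemma pmB_pref_le (xs ys : List Char) : pmB_pref xs ys ≤ min xs.length ys.length := by
  induction xs generalizing ys with
  | nil => simp [pmB_pref]
  | cons x xs ih =>
    cases ys with
    | nil => simp [pmB_pref]
    | cons y ys =>
      by_cases h : x = y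
      · have := ih ys
        simp [pmB_pref, h]
        omega
      · simp [pmB_pref, h]

lemma take_eq_iff_le_pref : ∀ (xs ys : List Char) (m : Nat),
    m ≤ xs.length → m ≤ ys.length → (xs.take m = ys.take m ↔ m ≤ pmB_pref xs ys) := by
  intro xs
  induction xs with
  | nil =>
    intro ys m hm _
    have h0 : m = 0 := by simpa using hm
    subst h0; simp
  | cons x xs ih =>
    intro ys m hx hy
    cases ys with
    | nil =>
      have h0 : m = 0 := by simpa using hy
      subst h0; simp
    | cons y ys =>
      cases m with
      | zero => simp
      | succ m =>
        by_cases h : x = y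
        · subst h
          simp only [List.take_succ_cons, List.cons.injEq, pmB_pref_cons, true_and]
          rw [ih ys m (by simpa using hx) (by simpa using hy)]
          omega
        · have hpz : pmB_pref (x::xs) (y::ys) = 0 := by simp [pmB_pref, h]
          simp only [List.take_succ_cons, List.cons.injEq, hpz]
          simp [h]

lemma pmBS_eq (xs ys : List Char) : ∀ lo hi,
    lo ≤ pmB_pref xs ys → pmB_pref xs ys ≤ hi → hi ≤ min xs.length ys.length →
    pmBS xs ys lo hi = pmB_pref xs ys := by
  intro lo hi
  induction lo, hi using pmBS.induct xs ys with
  | case1 lo hi hlt heq ih =>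
    intro h1 h2 h3
    rw [pmBS, dif_pos hlt, if_pos heq]
    have hmid : (lo + hi + 1) / 2 ≤ pmB_pref xs ys := by
      rw [← take_eq_iff_le_pref xs ys _ (by omega) (by omega)]
      exact heq
    exact ih hmid h2 h3
  | case2 lo hi hlt hne ih =>
    intro h1 h2 h3
    rw [pmBS, dif_pos hlt, if_neg hne]
    have hmid : ¬ ((lo + hi + 1) / 2 ≤ pmB_pref xs ys) := by
      rw [← take_eq_iff_le_pref xs ys _ (by omega) (by omega)]
      exact hne
    exact ih h1 (by omega) (by omega)
  | case3 lo hi hge =>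
    intro h1 h2 _
    rw [pmBS, dif_neg hge]
    omega

-- prepend one character to a result string
def pvPrep (c : Char) (s : String) : String := String.ofList (c :: s.toList)

-- list-level bodies of the two ports (B's with the binary search already replaced by pmB_pref)
def pvA (xs ys : List Char) : Option String :=
  pmA_loop xs ys (if xs < ys then ys else xs).length 0

def pvB (xs ys : List Char) : Option String :=
  if pmB_pref xs ys < xs.length ∧ pmB_pref xs ys < ys.length then
    some (String.ofList (xs.take (pmB_pref xs ys) ++ '(' :: xs.drop (pmB_pref xs ys) ++ '|' :: ys.drop (pmB_pref xs ys) ++ [')']))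
  else if xs.length = ys.length then none
  else if (xs.drop (pmB_pref xs ys) ++ ys.drop (pmB_pref xs ys)).length = 1 then
    some (String.ofList (xs.take (pmB_pref xs ys) ++ (xs.drop (pmB_pref xs ys) ++ ys.drop (pmB_pref xs ys)) ++ ['?']))
  else
    some (String.ofList (xs.take (pmB_pref xs ys) ++ '(' :: (xs.drop (pmB_pref xs ys) ++ ys.drop (pmB_pref xs ys)) ++ ')' :: ['?']))

lemma alt_eq_pvB (input input2 : String) :
    pair_matcher_util_alt input input2 = pvB input.toList input2.toList := by
  have h := pmBS_eq input.toList input2.toList 0 _ (Nat.zero_le _) (pmB_pref_le _ _) le_rfl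
  simp only [pair_matcher_util_alt, pvB, h]

lemma pmA_loop_shift (c : Char) (xs ys : List Char) :
    ∀ fuel i, pmA_loop (c::xs) (c::ys) fuel (i+1)
      = Option.map (pvPrep c) (pmA_loop xs ys fuel i) := by
  intro fuel
  induction fuel with
  | zero => intro i; simp [pmA_loop]
  | succ n ih =>
    intro i
    simp only [pmA_loop, List.getElem?_cons_succ, List.take_succ_cons, List.drop_succ_cons]
    cases hx : xs[i]? <;> cases hy : ys[i]? <;> dsimp only <;> split_ifs <;>
      simp [ih, pvPrep, String.toList_append, List.cons_append, List.append_assoc]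

lemma pvB_shift (c : Char) (xs ys : List Char) :
    pvB (c::xs) (c::ys) = Option.map (pvPrep c) (pvB xs ys) := by
  simp only [pvB, pmB_pref_cons, List.length_cons, List.take_succ_cons, List.drop_succ_cons,
    Nat.add_lt_add_iff_right, Nat.add_right_cancel_iff]
  split_ifs with h1 h2 h3 <;>
    simp [pvPrep, String.toList_append, List.cons_append, List.append_assoc]

lemma pvA_shift (c : Char) (xs ys : List Char) :
    pvA (c::xs) (c::ys) = Option.map (pvPrep c) (pvA xs ys) := by
  have hmx : (if (c::xs : List Char) < (c::ys) then (c::ys) else (c::xs))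
      = c :: (if xs < ys then ys else xs) := by
    have hiff : ((c::xs : List Char) < (c::ys)) ↔ xs < ys := by
      rw [List.cons_lt_cons_iff]; simp
    by_cases h : xs < ys
    · rw [if_pos (hiff.mpr h), if_pos h]
    · rw [if_neg (fun h' => h (hiff.mp h')), if_neg h]
  unfold pvA
  rw [hmx]
  simp only [List.length_cons]
  -- one loop iteration at index 0: both heads are c, which are equal
  simp only [pmA_loop, List.getElem?_cons_zero]
  simp [pmA_loop_shift]

lemma pvA_eq_pvB : ∀ xs ys : List Char, pvA xs ys = pvB xs ys := by
  intro xs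
  induction xs with
  | nil =>
    intro ys
    cases ys with
    | nil => simp [pvA, pvB, pmA_loop, pmB_pref]
    | cons y ys =>
      have hlt : ([] : List Char) < y::ys := List.nil_lt_cons y ys
      simp [pvA, pvB, pmA_loop, pmB_pref, hlt]
  | cons x xs ih =>
    intro ys
    cases ys with
    | nil =>
      have hnlt : ¬ ((x::xs : List Char) < []) := List.not_lt_nil _
      simp [pvA, pvB, pmA_loop, pmB_pref, hnlt]
    | cons y ys =>
      by_cases hxy : x = y
      · subst hxy
        rw [pvA_shift, pvB_shift, ih]
      · have hfuel : ∃ m, (if (x::xs : List Char) < (y::ys) then (y::ys) else (x::xs)).length = m+1 := by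
          split
          · exact ⟨ys.length, rfl⟩
          · exact ⟨xs.length, rfl⟩
        obtain ⟨m, hm⟩ := hfuel
        unfold pvA
        rw [hm]
        simp [pmA_loop, pmB_pref, pvB, hxy]

-- ===== VERDICT (by name: the statement is the Claim_ definition above) =====
theorem pair_matcher_util_spec : Claim_equal_pair_matcher_util := by
  intro input input2 _
  unfold Spec_pair_matcher_util
  rw [alt_eq_pvB]
  have h := pvA_eq_pvB input.toList input2.toList
  simpa [pvA, pair_matcher_util] using h
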